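-- pv_equiv track=rewrite | github.com/nishio/atcoder | PAST5/j.py | solve
-- ===== SOURCE A (Python) =====
-- def solve(S, X):
--     X -= 1  # 1-origin to 0-origin
--     S += "0"
--     blocklen = [0]
--     unitlen = [0]
--     repeat = [0]
--     tailstart = [0]
--     taillen = [0]
--     tlen = 0
--     tstart = 0
--     for i, c in enumerate(S):
--         if c in "0123456789":
--             rep = int(c) + 1
--             repeat.append(rep)
--             tailstart.append(tstart)
--             taillen.append(tlen)
--             unitlen.append(blocklen[-1] + tlen)
--             blocklen.append(unitlen[-1] * rep)
--             if blocklen[-1] > X: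
--                 break
--             # next tail
--             tstart = i + 1
--             tlen = 0
--         else:
--             tlen += 1
--
--     for i in reversed(range(len(blocklen))):
--         X %= unitlen[i]
--         if X >= blocklen[i - 1]:
--             X -= blocklen[i - 1]
--             return S[tailstart[i] + X]
-- ===== SOURCE B (Python) =====
-- def solve(S, X):
--     X -= 1  # 1-origin to 0-origin
--     S += "0"
--     # one forward pass: segment S into (tailstart, taillen, digit) triples
--     segs = []
--     tstart = 0
--     for i, c in enumerate(S):
--         if "0" <= c <= "9":
--             segs.append((tstart, i - tstart, int(c)))
--             tstart = i + 1
--     # accumulate nested-block records (tailstart, unitlen, blocklen), innermost first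
--     recs = []
--     block = 0
--     for ts, tl, d in segs:
--         unit = block + tl
--         block = unit * (d + 1)
--         recs.append((ts, unit, block))
--     # first level whose block covers X (default: outermost)
--     k = len(recs) - 1
--     for j, (_, _, b) in enumerate(recs):
--         if b > X:
--             k = j
--             break
--     # top-down recursive resolution through the nested blocks
--     def resolve(k, x):
--         ts, u, _ = recs[k]
--         x %= u
--         bprev = recs[k - 1][2] if k > 0 else 0
--         if x >= bprev:
--             return S[ts + (x - bprev)]
--         return resolve(k - 1, x)
--     return resolve(k, X)
-- ===== Notes on version B (the rewrite author's own statement) =====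
-- stated objective: alternative
-- what changed: A's five parallel arrays built by a break-early parse followed by a reverse index walk that mutates X are replaced by a segment pass (one (tailstart,taillen,digit) triple per digit), a fold producing (tailstart,unitlen,blocklen) records, a search for the first covering level, and a top-down recursive resolve over the record list.
import Mathlib
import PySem

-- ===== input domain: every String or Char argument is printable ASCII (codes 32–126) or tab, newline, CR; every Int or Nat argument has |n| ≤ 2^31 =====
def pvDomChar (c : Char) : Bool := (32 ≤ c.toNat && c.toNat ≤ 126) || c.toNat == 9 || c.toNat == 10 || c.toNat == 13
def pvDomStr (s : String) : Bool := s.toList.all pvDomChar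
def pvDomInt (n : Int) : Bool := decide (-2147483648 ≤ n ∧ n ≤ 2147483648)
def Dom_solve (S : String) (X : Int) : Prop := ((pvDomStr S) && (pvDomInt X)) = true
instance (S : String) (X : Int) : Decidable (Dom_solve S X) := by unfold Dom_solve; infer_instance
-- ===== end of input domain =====

-- B replaces A's break-early parse with reverse index walk by a segment/record decomposition and a
-- top-down recursive resolver; objective: alternative structure, same O(n) cost.

-- ===== PORT A =====
-- the digit characters of Python's `c in "0123456789"` test
def pvDigits : List Char := ['0', '1', '2', '3', '4', '5', '6', '7', '8', '9']

-- A's first loop.  The five Python lists (blocklen, unitlen, repeat, tailstart, taillen) are kept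
-- REVERSED (append = cons, Python's `blocklen[-1]` = head); the early `break` returns the state.
def parseA (X : Int) : List Char → Int → Int → Int →
    (List Int × List Int × List Int × List Int × List Int) →
    (List Int × List Int × List Int × List Int × List Int)
  | [], _, _, _, st => st
  | c :: rest, i, tstart, tlen, (rbl, rul, rrep, rts, rtl) =>
    if pvDigits.contains c then
      let rep := ((c.toNat : Int) - 48) + 1
      let u := rbl.headD 0 + tlen          -- blocklen[-1] + tlen (the list is never empty)
      let b := u * rep
      let st' := (b :: rbl, u :: rul, rep :: rrep, tstart :: rts, tlen :: rtl)
      if b > X then st'                    -- break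
      else parseA X rest (i + 1) (i + 1) 0 st'
    else parseA X rest (i + 1) tstart (tlen + 1) (rbl, rul, rrep, rts, rtl)

-- A's second loop, `for i in reversed(range(len(blocklen)))`, walking the reversed lists head to
-- tail; `X %= unitlen[i]` with unitlen[i] == 0 raises ZeroDivisionError = none; `blocklen[i-1]`
-- at i = 0 is Python's wrap to blocklen[-1] = head of the reversed list (`bs.headD b0`);
-- falling off the loop returns Python's None = none.
def descendA (S' : List Char) : List Int → List Int → List Int → Int → Option String
  | u :: us, b0 :: bs, ts :: tss, x =>
    if u = 0 then none
    else
      let x' := PySem.Int.mod x u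
      let bprev := bs.headD b0
      if bprev ≤ x' then (PySem.List.pyGet? S' (ts + (x' - bprev))).map (fun c => String.ofList [c])
      else descendA S' us bs tss x'
  | _, _, _, _ => none

def solve (S : String) (X : Int) : String :=
  let X1 := X - 1
  let S' := S.toList ++ ['0']
  match parseA X1 S' 0 0 0 ([0], [0], [0], [0], [0]) with
  | (rbl, rul, _, rts, _) => (descendA S' rul rbl rts X1).getD ""

-- ===== PORT B =====
-- segment the string into (tailstart, taillen, digit) triples, one per digit character
def segsB : List Char → Int → Int → List (Int × Int × Int)
  | [], _, _ => []
  | c :: rest, i, tstart =>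
    if '0' ≤ c ∧ c ≤ '9' then ((tstart, i - tstart, (c.toNat : Int) - 48)) :: segsB rest (i + 1) (i + 1)
    else segsB rest (i + 1) tstart

-- accumulate the nested-block records (tailstart, unitlen, blocklen), innermost first
def recsB : List (Int × Int × Int) → Int → List (Int × Int × Int)
  | [], _ => []
  | (ts, tl, d) :: rest, block =>
    let u := block + tl
    (ts, u, u * (d + 1)) :: recsB rest (u * (d + 1))

-- first level whose block covers X (the loop with break; dflt = len(recs) - 1)
def locateB : List (Int × Int × Int) → Nat → Int → Nat → Nat
  | [], _, _, dflt => dflt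
  | r :: rest, j, x, dflt => if r.2.2 > x then j else locateB rest (j + 1) x dflt

-- the recursive resolve(k, x); `x %= u` with u == 0 raises ZeroDivisionError = none; the inner
-- k = 0 else-branch is where Python would recurse with the wrapped index recs[-1] — unreachable,
-- since there u > 0 forces bprev = 0 ≤ x'
def resolveB (S' : List Char) (recs : List (Int × Int × Int)) (k : Nat) (x : Int) : Option String :=
  match recs[k]? with
  | none => none
  | some (ts, u, _) =>
    if u = 0 then none
    else
      let x' := PySem.Int.mod x u
      let bprev := if k = 0 then 0 else ((recs[k - 1]?).map (fun r => r.2.2)).getD 0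
      if bprev ≤ x' then (PySem.List.pyGet? S' (ts + (x' - bprev))).map (fun c => String.ofList [c])
      else
        match k with
        | 0 => none
        | k' + 1 => resolveB S' recs k' x'

def solve_alt (S : String) (X : Int) : String :=
  let X1 := X - 1
  let S' := S.toList ++ ['0']
  let recs := recsB (segsB S' 0 0) 0
  let k := locateB recs 0 X1 (recs.length - 1)
  (resolveB S' recs k X1).getD ""

-- ===== PRECONDITION & SPEC =====
-- Pre_ excludes exactly the inputs where Python A raises ZeroDivisionError: X ≥ 1 with S made
-- only of digits (or empty), or X ≤ 0 with S empty or starting with a digit.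
def Pre_solve (S : String) (X : Int) : Prop :=
  if 0 < X then ¬ (S.toList.all (fun c => decide ('0' ≤ c) && decide (c ≤ '9')) = true)
  else S.toList ≠ [] ∧ ¬ ('0' ≤ S.toList.headD '0' ∧ S.toList.headD '0' ≤ '9')
instance (S : String) (X : Int) : Decidable (Pre_solve S X) := by unfold Pre_solve; infer_instance

def pvWitness_solve : String × Int := ("ab2c3", 5)

def Spec_solve (S : String) (X : Int) (out : String) : Prop := out = solve_alt S X
instance (S : String) (X : Int) (out : String) : Decidable (Spec_solve S X out) := by unfold Spec_solve; infer_instance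

-- ===== CLAIM (what is proved, stated in full; the proofs are below) =====
def Claim_equal_solve : Prop := ∀ (S : String) (X : Int), Dom_solve S X → Pre_solve S X → Spec_solve S X (solve S X)

-- ===== LEMMAS AND PROOFS =====

-- the records up to and including the first one whose blocklen exceeds X (all of them if none does):
-- exactly the prefix A's break-early parse produces
def takeCover (X : Int) : List (Int × Int × Int) → List (Int × Int × Int)
  | [] => []
  | r :: rest => if r.2.2 > X then [r] else r :: takeCover X rest

theorem pvDigits_contains_iff (c : Char) : pvDigits.contains c = true ↔ ('0' ≤ c ∧ c ≤ '9') := by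
  simp only [pvDigits, List.contains_eq_mem, List.mem_cons, List.not_mem_nil, or_false,
    decide_eq_true_eq]
  have h0 : ('0' : Char).val.toNat = 48 := rfl
  have h9 : ('9' : Char).val.toNat = 57 := rfl
  have heq : ∀ d : Char, c = d ↔ c.val.toNat = d.val.toNat := by
    intro d
    rw [Char.ext_iff, UInt32.ext_iff, UInt32.toNat_inj]
  constructor
  · rintro (rfl|rfl|rfl|rfl|rfl|rfl|rfl|rfl|rfl|rfl) <;> exact ⟨by decide, by decide⟩
  · rintro ⟨h1, h2⟩
    rw [Char.le_def, UInt32.le_iff_toNat_le] at h1 h2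
    rw [h0] at h1; rw [h9] at h2
    simp only [heq]
    show c.val.toNat = 48 ∨ c.val.toNat = 49 ∨ c.val.toNat = 50 ∨ c.val.toNat = 51 ∨
      c.val.toNat = 52 ∨ c.val.toNat = 53 ∨ c.val.toNat = 54 ∨ c.val.toNat = 55 ∨
      c.val.toNat = 56 ∨ c.val.toNat = 57
    omega

-- A's break-early parse pushes exactly (the reverse of) B's covered record prefix onto its state
theorem parseA_eq (X : Int) (cs : List Char) : ∀ (i tstart tlen : Int), tlen = i - tstart →
    ∀ (b0 : Int) (bs0 rul rrep rts rtl : List Int), ∃ rr tt,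
    parseA X cs i tstart tlen (b0 :: bs0, rul, rrep, rts, rtl)
      = ((takeCover X (recsB (segsB cs i tstart) b0)).reverse.map (fun r => r.2.2) ++ (b0 :: bs0),
         (takeCover X (recsB (segsB cs i tstart) b0)).reverse.map (fun r => r.2.1) ++ rul,
         rr,
         (takeCover X (recsB (segsB cs i tstart) b0)).reverse.map (fun r => r.1) ++ rts,
         tt) := by
  induction cs with
  | nil =>
    intro i tstart tlen h b0 bs0 rul rrep rts rtl
    exact ⟨rrep, rtl, by simp [parseA, segsB, recsB, takeCover]⟩
  | cons c rest ih =>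
    intro i tstart tlen h b0 bs0 rul rrep rts rtl
    subst h
    by_cases hc : ('0' ≤ c ∧ c ≤ '9')
    case pos =>
      have hc' : pvDigits.contains c = true := (pvDigits_contains_iff c).mpr hc
      simp only [parseA, segsB, recsB, hc', if_pos hc, List.headD_cons, if_true]
      by_cases hb : (b0 + (i - tstart)) * (((c.toNat : Int) - 48) + 1) > X
      case pos =>
        refine ⟨(((c.toNat : Int) - 48) + 1) :: rrep, (i - tstart) :: rtl, ?_⟩
        rw [if_pos hb]
        simp only [takeCover, hb, if_true, List.reverse_cons, List.reverse_nil, List.nil_append,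
          List.map_cons, List.map_nil, List.cons_append]
      case neg =>
        obtain ⟨rr, tt, hih⟩ := ih (i + 1) (i + 1) 0 (by ring)
          ((b0 + (i - tstart)) * (((c.toNat : Int) - 48) + 1)) (b0 :: bs0)
          ((b0 + (i - tstart)) :: rul) ((((c.toNat : Int) - 48) + 1) :: rrep)
          (tstart :: rts) ((i - tstart) :: rtl)
        refine ⟨rr, tt, ?_⟩
        rw [if_neg hb, hih]
        simp only [takeCover, hb, if_false, List.reverse_cons, List.map_append,
          List.map_cons, List.map_nil, List.append_assoc, List.cons_append, List.nil_append]
    case neg =>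
      have hc' : pvDigits.contains c = false := by
        rw [← Bool.not_eq_true, pvDigits_contains_iff]; exact hc
      simp only [parseA, segsB, hc', if_neg hc, Bool.false_eq_true, if_false]
      exact ih (i + 1) tstart ((i - tstart) + 1) (by ring) b0 bs0 rul rrep rts rtl

theorem locateB_ge : ∀ (rs : List (Int × Int × Int)) (j : Nat) (x : Int) (d : Nat),
    min j d ≤ locateB rs j x d := by
  intro rs
  induction rs with
  | nil => intro j x d; simp [locateB]
  | cons r rest ih =>
    intro j x d
    simp only [locateB]
    split
    · omega
    · have := ih (j + 1) x d; omega

theorem locateB_le : ∀ (rs : List (Int × Int × Int)) (j : Nat) (x : Int) (d : Nat),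
    locateB rs j x d ≤ max d (j + rs.length - 1) := by
  intro rs
  induction rs with
  | nil => intro j x d; simp [locateB]
  | cons r rest ih =>
    intro j x d
    simp only [locateB, List.length_cons]
    split
    · omega
    · have := ih (j + 1) x d; omega

-- B's locate-loop result turns takeCover into List.take
theorem takeCover_locate : ∀ (rs : List (Int × Int × Int)) (j : Nat) (x : Int),
    takeCover x rs = rs.take (locateB rs j x (j + rs.length - 1) + 1 - j) := by
  intro rs
  induction rs with
  | nil => intro j x; simp [takeCover, locateB]
  | cons r rest ih =>
    intro j x
    simp only [takeCover, locateB, List.length_cons]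
    split
    · simp
    · have hd : j + (rest.length + 1) - 1 = (j + 1) + rest.length - 1 := by omega
      rw [hd]
      have hge := locateB_ge rest (j + 1) x ((j + 1) + rest.length - 1)
      have hLj : j ≤ locateB rest (j + 1) x ((j + 1) + rest.length - 1) := by omega
      have h1 : locateB rest (j + 1) x ((j + 1) + rest.length - 1) + 1 - j
              = (locateB rest (j + 1) x ((j + 1) + rest.length - 1) - j) + 1 := by omega
      have h2 : locateB rest (j + 1) x ((j + 1) + rest.length - 1) + 1 - (j + 1)
              = locateB rest (j + 1) x ((j + 1) + rest.length - 1) - j := by omega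
      rw [h1, List.take_succ_cons, ih (j + 1) x, h2]

theorem segsB_ne_nil : ∀ (cs : List Char) (i tstart : Int), segsB (cs ++ ['0']) i tstart ≠ [] := by
  intro cs
  induction cs with
  | nil => intro i t; simp [segsB]
  | cons c rest ih =>
    intro i t
    simp only [List.cons_append, segsB]
    split
    · simp
    · exact ih (i + 1) t

theorem recsB_length : ∀ (ss : List (Int × Int × Int)) (b : Int), (recsB ss b).length = ss.length := by
  intro ss
  induction ss with
  | nil => intro b; simp [recsB]
  | cons s rest ih => intro b; obtain ⟨ts, tl, d⟩ := s; simp [recsB, ih]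

theorem take_succ_reverse {α : Type} (l : List α) (k : Nat) (h : k < l.length) :
    (l.take (k + 1)).reverse = l[k] :: (l.take k).reverse := by
  rw [List.take_add_one, List.getElem?_eq_getElem h]
  simp

-- A's reverse index walk over the covered prefix = B's recursive resolve
theorem descend_resolve (S' : List Char) (recs : List (Int × Int × Int)) :
    ∀ (k : Nat) (x : Int), k < recs.length →
    descendA S' ((recs.take (k + 1)).reverse.map (fun r => r.2.1) ++ [0])
               ((recs.take (k + 1)).reverse.map (fun r => r.2.2) ++ [0])
               ((recs.take (k + 1)).reverse.map (fun r => r.1) ++ [0]) x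
      = resolveB S' recs k x := by
  intro k
  induction k with
  | zero =>
    intro x hk
    rw [take_succ_reverse recs 0 hk]
    simp only [List.take_zero, List.reverse_nil, List.map_cons, List.map_nil, List.cons_append,
      List.nil_append]
    rw [resolveB, List.getElem?_eq_getElem hk]
    obtain ⟨ts, u, b⟩ := recs[0]
    simp only [descendA, List.headD_cons]
    split
    · rfl
    · simp only [reduceIte]
  | succ k' ih =>
    intro x hk
    have hk' : k' < recs.length := by omega
    rw [take_succ_reverse recs (k' + 1) hk]
    simp only [List.map_cons, List.cons_append]
    rw [resolveB, List.getElem?_eq_getElem hk]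
    generalize recs[k' + 1] = r
    obtain ⟨ts, u, b⟩ := r
    simp only [descendA]
    have hbprev : (((recs.take (k' + 1)).reverse.map (fun r => (r : Int × Int × Int).2.2))
          ++ [(0 : Int)]).headD b = recs[k'].2.2 := by
      rw [take_succ_reverse recs k' hk']
      simp
    rw [hbprev, if_neg (Nat.succ_ne_zero k')]
    simp only [Nat.add_sub_cancel]
    rw [List.getElem?_eq_getElem hk']
    simp only [Option.map_some, Option.getD_some]
    split
    · rfl
    · split
      · rfl
      · exact ih _ hk'

-- ===== VERDICT (by name: the statement is the Claim_ definition above) =====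
theorem solve_spec : Claim_equal_solve := by
  unfold Claim_equal_solve
  intro S X _ _
  unfold Spec_solve solve solve_alt
  obtain ⟨rr, tt, hp⟩ := parseA_eq (X - 1) (S.toList ++ ['0']) 0 0 0 (by ring) 0 [] [0] [0] [0] [0]
  simp only []
  rw [hp]
  simp only []
  have hne : recsB (segsB (S.toList ++ ['0']) 0 0) 0 ≠ [] := by
    intro h
    have hl := recsB_length (segsB (S.toList ++ ['0']) 0 0) 0
    rw [h] at hl
    exact segsB_ne_nil S.toList 0 0 (List.length_eq_zero_iff.mp hl.symm)
  set recs := recsB (segsB (S.toList ++ ['0']) 0 0) 0 with hrecs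
  have hpos : 0 < recs.length := List.length_pos_iff.mpr hne
  set k := locateB recs 0 (X - 1) (recs.length - 1) with hkdef
  have hkle : k ≤ recs.length - 1 := by
    have := locateB_le recs 0 (X - 1) (recs.length - 1)
    omega
  have hk : k < recs.length := by omega
  have htc : takeCover (X - 1) recs = recs.take (k + 1) := by
    have := takeCover_locate recs 0 (X - 1)
    rw [hkdef]
    simpa using this
  rw [htc, descend_resolve (S.toList ++ ['0']) recs k (X - 1) hk]
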